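-- pv_equiv track=rewrite | github.com/aarathiinair/microservice-architecture | processor.py | resolve_infrastructure
-- ===== SOURCE A (Python) =====
-- from typing import Dict, List, Optional, Any
--
-- def resolve_infrastructure(groups: List[str]) -> str:
--     if not groups:
--         return "General"
--     if len(groups) == 1:
--         return groups[0]
--     groups_lower = [g.lower() for g in groups]
--     for i, g in enumerate(groups_lower):
--         if "oi-rda" in g:
--             return groups[i]
--     oi_ibs_idx = None
--     for i, g in enumerate(groups_lower):
--         if "oi-ibs" in g:
--             oi_ibs_idx = i
--             break
--     if oi_ibs_idx is not None:
--         for i, g in enumerate(groups):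
--             if i != oi_ibs_idx:
--                 return g
--     return groups[0]
-- ===== SOURCE B (Python) =====
-- def resolve_infrastructure(groups):
--     if not groups:
--         return "General"
--     if len(groups) == 1:
--         return groups[0]
--     for i, g in enumerate(groups):
--         if "oi-rda" in g.lower():
--             return groups[i]
--     # A's ibs scan + "first index != ibs_idx" loop collapse to one test on groups[0]:
--     # the result is groups[1] exactly when the FIRST ibs match is at index 0,
--     # i.e. when groups[0] itself contains "oi-ibs"; otherwise groups[0].
--     return groups[1] if "oi-ibs" in groups[0].lower() else groups[0]
-- ===== Notes on version B (the rewrite author's own statement) =====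
-- stated objective: simpler
-- what changed: B deletes A's ibs scan and its third 'first index != ibs_idx' loop entirely: after the rda scan it decides groups[1]-vs-groups[0] by a single membership test on groups[0] (the first ibs index is 0 iff groups[0] contains 'oi-ibs', and any later ibs match is irrelevant), so no ibs index is ever computed; B also skips materializing the lowered copy of the whole list.
import Mathlib
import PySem

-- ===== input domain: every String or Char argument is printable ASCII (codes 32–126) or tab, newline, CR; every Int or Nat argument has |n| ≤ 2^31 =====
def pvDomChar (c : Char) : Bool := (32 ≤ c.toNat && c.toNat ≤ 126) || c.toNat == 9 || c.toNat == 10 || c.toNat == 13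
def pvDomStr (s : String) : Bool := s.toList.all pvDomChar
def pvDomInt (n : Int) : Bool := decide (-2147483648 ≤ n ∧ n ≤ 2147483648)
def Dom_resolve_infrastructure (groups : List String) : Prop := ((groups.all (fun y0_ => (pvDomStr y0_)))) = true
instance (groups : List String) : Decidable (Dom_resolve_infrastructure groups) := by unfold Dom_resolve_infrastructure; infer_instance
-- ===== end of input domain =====

-- B drops A's ibs scan and the third loop: a single test on groups[0] decides groups[1]-vs-groups[0]; objective: simpler.

-- ===== PORT A =====
-- first loop: first index whose (already lowered) string contains "oi-rda"
def loopRda : List (Int × String) → Option Int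
  | [] => none
  | (i, g) :: rest => if PySem.Str.isIn "oi-rda" g then some i else loopRda rest

-- second loop: first index whose (already lowered) string contains "oi-ibs" (break)
def loopIbs : List (Int × String) → Option Int
  | [] => none
  | (i, g) :: rest => if PySem.Str.isIn "oi-ibs" g then some i else loopIbs rest

-- third loop: first group whose index differs from oi_ibs_idx
def loopRet (j : Int) : List (Int × String) → Option String
  | [] => none
  | (i, g) :: rest => if i ≠ j then some g else loopRet j rest

def resolve_infrastructure (groups : List String) : String :=
  if groups = [] then "General"
  else if groups.length = 1 then PySem.List.pyGetD groups 0 ""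
  else
    let groups_lower := groups.map PySem.Str.lower
    match loopRda (PySem.List.enumerate groups_lower 0) with
    | some i => PySem.List.pyGetD groups i ""
    | none =>
      match loopIbs (PySem.List.enumerate groups_lower 0) with
      | some j =>
        match loopRet j (PySem.List.enumerate groups 0) with
        | some g => g
        | none => PySem.List.pyGetD groups 0 ""
      | none => PySem.List.pyGetD groups 0 ""

-- ===== PORT B =====
-- B's only loop: the rda scan, lowercasing inline
def findRda : List (Int × String) → Option Int
  | [] => none
  | (i, g) :: rest => if PySem.Str.isIn "oi-rda" (PySem.Str.lower g) then some i else findRda rest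

def resolve_infrastructure_alt (groups : List String) : String :=
  if groups = [] then "General"
  else if groups.length = 1 then PySem.List.pyGetD groups 0 ""
  else
    match findRda (PySem.List.enumerate groups 0) with
    | some i => PySem.List.pyGetD groups i ""
    | none =>
      if PySem.Str.isIn "oi-ibs" (PySem.Str.lower (PySem.List.pyGetD groups 0 ""))
      then PySem.List.pyGetD groups 1 ""
      else PySem.List.pyGetD groups 0 ""

-- ===== PRECONDITION & SPEC =====
def Spec_resolve_infrastructure (groups : List String) (out : String) : Prop := out = resolve_infrastructure_alt groups
instance (groups : List String) (out : String) : Decidable (Spec_resolve_infrastructure groups out) := by unfold Spec_resolve_infrastructure; infer_instance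

-- ===== CLAIM (what is proved, stated in full; the proofs are below) =====
def Claim_equal_resolve_infrastructure : Prop := ∀ (groups : List String), Dom_resolve_infrastructure groups → Spec_resolve_infrastructure groups (resolve_infrastructure groups)

-- ===== LEMMAS AND PROOFS =====

theorem enumerate_map_lower (xs : List String) (s : Int) :
    PySem.List.enumerate (xs.map PySem.Str.lower) s
      = (PySem.List.enumerate xs s).map (fun p => (p.1, PySem.Str.lower p.2)) := by
  induction xs generalizing s with
  | nil => simp [PySem.List.enumerate_nil]
  | cons x xs ih => simp [PySem.List.enumerate_cons, ih]

-- B's scan equals A's scan over the pre-lowered pairs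
theorem findRda_eq (ps : List (Int × String)) :
    findRda ps = loopRda (ps.map (fun p => (p.1, PySem.Str.lower p.2))) := by
  induction ps with
  | nil => rfl
  | cons p rest ih =>
    obtain ⟨i, g⟩ := p
    simp only [findRda, List.map_cons, loopRda, ih]

-- any index loopIbs returns over an enumeration starting at s is ≥ s
theorem loopIbs_ge (xs : List String) (s j : Int)
    (h : loopIbs ((PySem.List.enumerate xs s).map (fun p => (p.1, PySem.Str.lower p.2))) = some j) :
    s ≤ j := by
  induction xs generalizing s with
  | nil => simp [PySem.List.enumerate_nil, loopIbs] at h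
  | cons x xs ih =>
    simp only [PySem.List.enumerate_cons, List.map_cons, loopIbs] at h
    split at h
    · simp only [Option.some.injEq] at h; omega
    · have := ih (s + 1) h; omega

theorem loopRet_two (j : Int) (a b : String) (rest : List String) :
    loopRet j (PySem.List.enumerate (a :: b :: rest) 0)
      = some (if j = 0 then b else a) := by
  simp only [PySem.List.enumerate_cons, loopRet]
  by_cases h : j = 0
  · subst h; norm_num [loopRet]
  · simp [h, Ne.symm h]

-- ===== VERDICT (by name: the statement is the Claim_ definition above) =====
theorem resolve_infrastructure_spec : Claim_equal_resolve_infrastructure := by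
  intro groups _
  show resolve_infrastructure groups = resolve_infrastructure_alt groups
  match groups with
  | [] => rfl
  | [a] => rfl
  | a :: b :: rest =>
    simp only [resolve_infrastructure, resolve_infrastructure_alt,
      if_neg (by simp : ¬(a :: b :: rest = [])),
      if_neg (by simp : ¬(a :: b :: rest).length = 1)]
    rw [enumerate_map_lower, findRda_eq]
    cases hrda : loopRda (((PySem.List.enumerate (a :: b :: rest) 0)).map
        (fun p => (p.1, PySem.Str.lower p.2))) with
    | some i => rfl
    | none =>
      dsimp only
      rw [show PySem.List.pyGetD (a :: b :: rest) 0 "" = a by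
            simp [PySem.List.pyGetD_ofNat'],
          show PySem.List.pyGetD (a :: b :: rest) 1 "" = b by
            simp [PySem.List.pyGetD_ofNat']]
      rcases hibs : loopIbs (((PySem.List.enumerate (a :: b :: rest) 0)).map
          (fun p => (p.1, PySem.Str.lower p.2))) with _ | j
      · -- no ibs anywhere, in particular not in a
        rw [hibs]
        have ha : PySem.Str.isIn "oi-ibs" (PySem.Str.lower a) = false := by
          cases hA : PySem.Str.isIn "oi-ibs" (PySem.Str.lower a) with
          | false => rfl
          | true =>
            exfalso
            simp only [PySem.List.enumerate_cons, List.map_cons, loopIbs, hA,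
              if_true] at hibs
            exact Option.some_ne_none _ hibs
        rw [ha]
        simp
      · -- first ibs index j: j = 0 iff a contains ibs
        rw [hibs]
        dsimp only
        rw [loopRet_two]
        simp only [PySem.List.enumerate_cons, List.map_cons, loopIbs] at hibs
        by_cases ha : PySem.Str.isIn "oi-ibs" (PySem.Str.lower a) = true
        · rw [if_pos ha] at hibs
          simp only [Option.some.injEq] at hibs
          rw [if_pos hibs.symm, ha, if_pos rfl]
        · rw [if_neg ha] at hibs
          have hge := loopIbs_ge (b :: rest) 1 j (by
            simp only [PySem.List.enumerate_cons, List.map_cons, loopIbs]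
            norm_num at hibs ⊢
            exact hibs)
          rw [if_neg (by omega : ¬ j = 0),
            (Bool.not_eq_true _).mp ha, if_neg Bool.false_ne_true]
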